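-- pv_equiv track=rewrite | github.com/StatewideOwl3/slm-benchmarking-qidk | QnA/evaluate.py | overlap_counts
-- ===== SOURCE A (Python) =====
-- from typing import Any, Dict, List, Optional, Sequence
--
-- def overlap_counts(pred_tokens: List[str], gold_tokens: List[str]) -> int:
--     gold_freq: Dict[str, int] = {}
--     for token in gold_tokens:
--         gold_freq[token] = gold_freq.get(token, 0) + 1
--     overlap = 0
--     for token in pred_tokens:
--         if gold_freq.get(token, 0) > 0:
--             overlap += 1
--             gold_freq[token] -= 1
--     return overlap
-- ===== SOURCE B (Python) =====
-- def overlap_counts(pred_tokens, gold_tokens):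
--     p = sorted(pred_tokens)
--     g = sorted(gold_tokens)
--     i = j = overlap = 0
--     while i < len(p) and j < len(g):
--         if p[i] == g[j]:
--             overlap += 1
--             i += 1
--             j += 1
--         elif p[i] < g[j]:
--             i += 1
--         else:
--             j += 1
--     return overlap
-- ===== Notes on version B (the rewrite author's own statement) =====
-- stated objective: alternative
-- what changed: Replaced A's hash-table counting with decrement by a comparison-based algorithm: sort both token lists and count matches with a two-pointer merge (no dict/counter at all).
import Mathlib
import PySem

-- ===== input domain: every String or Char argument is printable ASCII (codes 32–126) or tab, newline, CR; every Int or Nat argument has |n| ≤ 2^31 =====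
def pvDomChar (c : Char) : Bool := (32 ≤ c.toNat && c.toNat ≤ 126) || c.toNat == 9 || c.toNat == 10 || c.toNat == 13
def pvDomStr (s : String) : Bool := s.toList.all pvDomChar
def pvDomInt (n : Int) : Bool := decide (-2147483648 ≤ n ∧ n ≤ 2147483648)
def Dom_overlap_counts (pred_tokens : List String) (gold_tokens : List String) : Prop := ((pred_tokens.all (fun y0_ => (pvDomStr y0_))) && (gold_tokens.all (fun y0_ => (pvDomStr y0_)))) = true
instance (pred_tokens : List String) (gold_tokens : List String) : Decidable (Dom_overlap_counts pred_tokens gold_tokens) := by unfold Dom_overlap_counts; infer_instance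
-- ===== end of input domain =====

-- B replaces A's hash-table count-then-decrement with sort both lists plus a two-pointer merge count; alternative algorithm, similar cost.


-- ===== PORT A =====
def overlap_counts (pred_tokens : List String) (gold_tokens : List String) : Int :=
  -- gold_freq[token] = gold_freq.get(token, 0) + 1
  let gold_freq : PySem.Dict String Int :=
    gold_tokens.foldl (fun d token => d.insert token (d.getD token 0 + 1)) PySem.Dict.empty
  -- for token in pred_tokens: if gold_freq.get(token, 0) > 0: overlap += 1; gold_freq[token] -= 1
  let st :=
    pred_tokens.foldl
      (fun s token =>
        if s.1.getD token 0 > 0 then (s.1.insert token (s.1.getD token 0 - 1), s.2 + 1) else s)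
      (gold_freq, (0 : Int))
  st.2

-- ===== PORT B =====
-- the while loop over indices i, j, ported as structural recursion on the two sorted lists
def mergeCount : List String → List String → Int
  | x :: xs, y :: ys =>
      if x = y then 1 + mergeCount xs ys
      else if x < y then mergeCount xs (y :: ys)
      else mergeCount (x :: xs) ys
  | _, _ => 0
termination_by xs ys => xs.length + ys.length
decreasing_by all_goals (simp only [List.length_cons]; omega)

def overlap_counts_alt (pred_tokens : List String) (gold_tokens : List String) : Int :=
  let p := PySem.List.sorted pred_tokens (fun x => x) false
  let g := PySem.List.sorted gold_tokens (fun x => x) false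
  mergeCount p g

-- ===== PRECONDITION & SPEC =====
def Spec_overlap_counts (pred_tokens : List String) (gold_tokens : List String) (out : Int) : Prop := out = overlap_counts_alt pred_tokens gold_tokens
instance (pred_tokens : List String) (gold_tokens : List String) (out : Int) : Decidable (Spec_overlap_counts pred_tokens gold_tokens out) := by unfold Spec_overlap_counts; infer_instance

-- ===== CLAIM (what is proved, stated in full; the proofs are below) =====
def Claim_equal_overlap_counts : Prop := ∀ (pred_tokens : List String) (gold_tokens : List String), Dom_overlap_counts pred_tokens gold_tokens → Spec_overlap_counts pred_tokens gold_tokens (overlap_counts pred_tokens gold_tokens)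

-- ===== LEMMAS AND PROOFS =====

-- A's decrement loop computes the per-token minimum sum, for any nonnegative table d.
lemma aloop (pred : List String) :
    ∀ (d : PySem.Dict String Int) (acc : Int), (∀ t, 0 ≤ d.getD t 0) →
    (pred.foldl
      (fun s token =>
        if s.1.getD token 0 > 0 then (s.1.insert token (s.1.getD token 0 - 1), s.2 + 1) else s)
      (d, acc)).2
      = acc + ∑ t ∈ pred.toFinset, min ((pred.count t : Int)) (d.getD t 0) := by
  induction pred with
  | nil => intro d acc h; simp
  | cons t r ih =>
    intro d acc h
    rw [List.foldl_cons]
    by_cases hpos : d.getD t 0 > 0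
    · simp only [hpos, if_pos]
      rw [ih (d.insert t (d.getD t 0 - 1)) (acc + 1) (by
        intro u
        rw [PySem.Dict.getD_insert]
        split_ifs with hu
        · omega
        · exact h u)]
      by_cases ht : t ∈ r.toFinset
      · have hsets : (t :: r).toFinset = r.toFinset := by
          rw [List.toFinset_cons, Finset.insert_eq_self.mpr ht]
        rw [hsets]
        have hsplit : r.toFinset = insert t (r.toFinset.erase t) :=
          (Finset.insert_erase ht).symm
        rw [hsplit, Finset.sum_insert (Finset.notMem_erase t _),
            Finset.sum_insert (Finset.notMem_erase t _)]
        have hterm : min (((t :: r).count t : Int)) (d.getD t 0)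
            = 1 + min ((r.count t : Int)) (d.getD t 0 - 1) := by
          rw [List.count_cons_self]; push_cast; omega
        have hrest : ∀ u ∈ r.toFinset.erase t,
            min ((r.count u : Int)) ((d.insert t (d.getD t 0 - 1)).getD u 0)
              = min (((t :: r).count u : Int)) (d.getD u 0) := by
          intro u hu
          have hne : u ≠ t := Finset.ne_of_mem_erase hu
          rw [PySem.Dict.getD_insert, if_neg hne, List.count_cons_of_ne (by simpa using hne.symm)]
        rw [PySem.Dict.getD_insert, if_pos rfl, Finset.sum_congr rfl hrest, hterm]
        ring
      · rw [List.toFinset_cons, Finset.sum_insert ht]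
        have hcnt : r.count t = 0 := by
          simpa [List.count_eq_zero] using (fun hm => ht (List.mem_toFinset.mpr hm))
        have hterm : min (((t :: r).count t : Int)) (d.getD t 0) = 1 := by
          rw [List.count_cons_self, hcnt]; push_cast; omega
        have hrest : ∀ u ∈ r.toFinset,
            min ((r.count u : Int)) ((d.insert t (d.getD t 0 - 1)).getD u 0)
              = min (((t :: r).count u : Int)) (d.getD u 0) := by
          intro u hu
          have hne : u ≠ t := by rintro rfl; exact ht hu
          rw [PySem.Dict.getD_insert, if_neg hne, List.count_cons_of_ne (by simpa using hne.symm)]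
        rw [Finset.sum_congr rfl hrest, hterm]
        ring
    · simp only [hpos, if_false]
      rw [ih d acc h]
      have hz : d.getD t 0 = 0 := by have := h t; omega
      congr 1
      have hcong : ∀ u ∈ (t :: r).toFinset,
          min (((t :: r).count u : Int)) (d.getD u 0)
            = min ((r.count u : Int)) (d.getD u 0) := by
        intro u hu
        by_cases hut : u = t
        · subst hut
          rw [hz, List.count_cons_self]; push_cast; omega
        · rw [List.count_cons_of_ne (by simpa using Ne.symm hut)]
      by_cases ht : t ∈ r.toFinset
      · have hsets : (t :: r).toFinset = r.toFinset := by
          rw [List.toFinset_cons, Finset.insert_eq_self.mpr ht]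
        rw [← hsets]
        exact (Finset.sum_congr rfl hcong).symm
      · rw [List.toFinset_cons, Finset.sum_insert ht]
        have ht0 : min (((t :: r).count t : Int)) (d.getD t 0) = 0 := by
          rw [hz, List.count_cons_self]; push_cast; omega
        rw [ht0, zero_add]
        refine (Finset.sum_congr rfl fun u hu => ?_).symm
        have hne : u ≠ t := by rintro rfl; exact ht hu
        rw [List.count_cons_of_ne (by simpa using hne.symm)]

-- sum helpers for the merge invariant
lemma sum_min_cons_cons (y : String) (xs ys : List String) :
    ∑ t ∈ (y :: xs).toFinset, min (((y :: xs).count t : Int)) (((y :: ys).count t : Int))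
      = 1 + ∑ t ∈ xs.toFinset, min ((xs.count t : Int)) ((ys.count t : Int)) := by
  by_cases hy : y ∈ xs.toFinset
  · have hsets : (y :: xs).toFinset = xs.toFinset := by
      rw [List.toFinset_cons, Finset.insert_eq_self.mpr hy]
    rw [hsets]
    have hsplit : xs.toFinset = insert y (xs.toFinset.erase y) := (Finset.insert_erase hy).symm
    rw [hsplit, Finset.sum_insert (Finset.notMem_erase y _),
        Finset.sum_insert (Finset.notMem_erase y _)]
    have hterm : min (((y :: xs).count y : Int)) (((y :: ys).count y : Int))
        = 1 + min ((xs.count y : Int)) ((ys.count y : Int)) := by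
      rw [List.count_cons_self, List.count_cons_self]; push_cast; omega
    have hrest : ∀ u ∈ xs.toFinset.erase y,
        min (((y :: xs).count u : Int)) (((y :: ys).count u : Int))
          = min ((xs.count u : Int)) ((ys.count u : Int)) := by
      intro u hu
      have hne : u ≠ y := Finset.ne_of_mem_erase hu
      rw [List.count_cons_of_ne (by simpa using hne.symm),
          List.count_cons_of_ne (by simpa using hne.symm)]
    rw [hterm, Finset.sum_congr rfl hrest]; ring
  · rw [List.toFinset_cons, Finset.sum_insert hy]
    have hcnt : xs.count y = 0 := by
      simpa [List.count_eq_zero] using (fun hm => hy (List.mem_toFinset.mpr hm))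
    have hterm : min (((y :: xs).count y : Int)) (((y :: ys).count y : Int)) = 1 := by
      rw [List.count_cons_self, List.count_cons_self, hcnt]; push_cast; omega
    have hrest : ∀ u ∈ xs.toFinset,
        min (((y :: xs).count u : Int)) (((y :: ys).count u : Int))
          = min ((xs.count u : Int)) ((ys.count u : Int)) := by
      intro u hu
      have hne : u ≠ y := by rintro rfl; exact hy hu
      rw [List.count_cons_of_ne (by simpa using hne.symm),
          List.count_cons_of_ne (by simpa using hne.symm)]
    rw [hterm, Finset.sum_congr rfl hrest]

lemma sum_min_cons_left (x : String) (xs g : List String) (hx : g.count x = 0) :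
    ∑ t ∈ (x :: xs).toFinset, min (((x :: xs).count t : Int)) ((g.count t : Int))
      = ∑ t ∈ xs.toFinset, min ((xs.count t : Int)) ((g.count t : Int)) := by
  have hf : ∀ t, min (((x :: xs).count t : Int)) ((g.count t : Int))
      = min ((xs.count t : Int)) ((g.count t : Int)) := by
    intro t
    by_cases ht : t = x
    · subst ht; rw [hx, List.count_cons_self]; push_cast; omega
    · rw [List.count_cons_of_ne (by simpa using Ne.symm ht)]
  by_cases hmem : x ∈ xs.toFinset
  · have hsets : (x :: xs).toFinset = xs.toFinset := by
      rw [List.toFinset_cons, Finset.insert_eq_self.mpr hmem]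
    rw [hsets]
    exact Finset.sum_congr rfl (fun u _ => hf u)
  · rw [List.toFinset_cons, Finset.sum_insert hmem, hf x]
    have hx0 : min ((xs.count x : Int)) ((g.count x : Int)) = 0 := by
      rw [hx]; push_cast; omega
    rw [hx0, zero_add]
    exact Finset.sum_congr rfl (fun u _ => hf u)

lemma sum_min_cons_right (p : List String) (y : String) (ys : List String) (hy : y ∉ p) :
    ∑ t ∈ p.toFinset, min ((p.count t : Int)) (((y :: ys).count t : Int))
      = ∑ t ∈ p.toFinset, min ((p.count t : Int)) ((ys.count t : Int)) := by
  refine Finset.sum_congr rfl (fun u hu => ?_)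
  have hne : u ≠ y := by rintro rfl; exact hy (List.mem_toFinset.mp hu)
  rw [List.count_cons_of_ne (by simpa using hne.symm)]

-- the two-pointer merge over two ≤-sorted lists computes the per-token minimum sum
lemma mergeCount_eq (p g : List String)
    (hp : p.Pairwise (fun a b => a ≤ b)) (hg : g.Pairwise (fun a b => a ≤ b)) :
    mergeCount p g = ∑ t ∈ p.toFinset, min ((p.count t : Int)) ((g.count t : Int)) := by
  induction p, g using mergeCount.induct with
  | case1 xs y ys ih =>
    rw [show mergeCount (y :: xs) (y :: ys) = 1 + mergeCount xs ys from by
          rw [mergeCount]; simp,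
        ih (List.Pairwise.of_cons hp) (List.Pairwise.of_cons hg), sum_min_cons_cons]
  | case2 x xs y ys hne hlt ih =>
    have hx : (y :: ys).count x = 0 := by
      rw [List.count_eq_zero]
      intro hm
      rcases List.mem_cons.mp hm with h | h
      · exact hne h
      · exact absurd (List.rel_of_pairwise_cons hg h) (not_le.mpr hlt)
    rw [show mergeCount (x :: xs) (y :: ys) = mergeCount xs (y :: ys) from by
          rw [mergeCount]; simp [hne, hlt],
        ih (List.Pairwise.of_cons hp) hg, sum_min_cons_left x xs (y :: ys) hx]
  | case3 x xs y ys hne hnlt ih =>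
    have hylt : y < x := lt_of_le_of_ne (not_lt.mp hnlt) (fun h => hne h.symm)
    have hy : y ∉ (x :: xs) := by
      intro hm
      rcases List.mem_cons.mp hm with h | h
      · exact hne h.symm
      · exact absurd (List.rel_of_pairwise_cons hp h) (not_le.mpr hylt)
    rw [show mergeCount (x :: xs) (y :: ys) = mergeCount (x :: xs) ys from by
          rw [mergeCount]; simp [hne, hnlt],
        ih hp (List.Pairwise.of_cons hg), sum_min_cons_right _ _ _ hy]
  | case4 p g h =>
    cases p with
    | nil => simp [mergeCount]
    | cons x xs =>
      cases g with
      | nil =>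
        rw [show mergeCount (x :: xs) [] = 0 from by simp [mergeCount]]
        refine (Finset.sum_eq_zero (fun t _ => ?_)).symm
        simp
      | cons y ys => exact (h x xs y ys rfl rfl).elim

-- ===== VERDICT (by name: the statement is the Claim_ definition above) =====
theorem overlap_counts_spec : Claim_equal_overlap_counts := by
  intro pred gold _
  unfold Spec_overlap_counts
  unfold overlap_counts
  rw [PySem.Dict.foldl_insert_getD_add_one_eq_counter]
  rw [aloop pred (PySem.Dict.counter gold) 0
      (fun t => by rw [PySem.Dict.getD_counter]; positivity)]
  simp only [PySem.Dict.getD_counter, zero_add]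
  unfold overlap_counts_alt
  rw [mergeCount_eq _ _ (PySem.List.sorted_pairwise pred (fun x => x))
        (PySem.List.sorted_pairwise gold (fun x => x))]
  have pp := PySem.List.sorted_perm pred (fun x : String => x) false
  have pg := PySem.List.sorted_perm gold (fun x : String => x) false
  have hfs : (PySem.List.sorted pred (fun x : String => x) false).toFinset = pred.toFinset := by
    apply Finset.ext; intro t; simp [List.mem_toFinset, pp.mem_iff]
  rw [hfs]
  exact Finset.sum_congr rfl (fun t _ => by rw [pp.count_eq, pg.count_eq])
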